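-- pv_equiv track=rewrite | github.com/pgarrett-scripps/PeptideModificationVisualizer | modification/sequon_utils.py | parse_sequon
-- ===== SOURCE A (Python) =====
-- def parse_sequon(sequon):
--     residues_pos, residues_neg = set(), set()
--     sequons_pos_neg = sequon.split("!")
--
--     residues_to_exclude = []
--     residues_to_include = sequons_pos_neg[0]
--     if len(sequons_pos_neg) > 1:
--         residues_to_exclude = sequons_pos_neg[1]
--
--     for s in residues_to_include:
--         if s == "X":
--             residues_pos.update(list('ARNDCEQGHILKMFPSTWYV'))
--         elif s in 'ARNDCEQGHILKMFPSTWYV':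
--             residues_pos.add(s)
--
--     for s in residues_to_exclude:
--         if s == "X":
--             residues_neg.update(list('ARNDCEQGHILKMFPSTWYV'))
--         elif s in 'ARNDCEQGHILKMFPSTWYV':
--             residues_neg.add(s)
--
--     return residues_pos - residues_neg
-- ===== SOURCE B (Python) =====
-- ALPHABET = 'ARNDCEQGHILKMFPSTWYV'
--
--
-- def parse_sequon(sequon):
--     # Single pass over the raw string: a '!' counter selects the section, and an
--     # insertion-ordered dict is edited in place (inserts while in the include
--     # section, deletions/clear while in the exclude section); no split, no
--     # second set, no set difference.
--     allowed = {}
--     bangs = 0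
--     for ch in sequon:
--         if ch == '!':
--             bangs += 1
--         elif bangs == 0:
--             if ch == 'X':
--                 for r in ALPHABET:
--                     allowed[r] = None
--             elif ch in ALPHABET:
--                 allowed[ch] = None
--         elif bangs == 1:
--             if ch == 'X':
--                 allowed.clear()
--             elif ch in ALPHABET:
--                 allowed.pop(ch, None)
--     return set(allowed)
-- ===== Notes on version B (the rewrite author's own statement) =====
-- stated objective: alternative
-- what changed: Replaces split-into-parts plus two set-accumulating loops and a final set difference by a single pass over the raw string with a '!' counter selecting the section and one insertion-ordered dict edited in place (inserts in the include section, pops/clear in the exclude section).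
import Mathlib
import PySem

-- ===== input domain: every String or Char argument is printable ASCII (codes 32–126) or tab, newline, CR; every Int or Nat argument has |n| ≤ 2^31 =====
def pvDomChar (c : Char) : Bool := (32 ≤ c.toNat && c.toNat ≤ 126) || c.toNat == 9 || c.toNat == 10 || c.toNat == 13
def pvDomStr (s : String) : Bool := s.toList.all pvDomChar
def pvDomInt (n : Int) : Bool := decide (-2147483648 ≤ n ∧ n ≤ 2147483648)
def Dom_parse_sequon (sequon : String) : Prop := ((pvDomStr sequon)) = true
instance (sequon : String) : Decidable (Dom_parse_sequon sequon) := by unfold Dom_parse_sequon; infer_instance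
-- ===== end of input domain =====

-- B replaces A's split-into-parts, two set-accumulating loops and final set difference by ONE pass
-- over the raw string: a '!' counter selects the section and a single insertion-ordered dict is
-- edited in place (inserts in the include section, pops/clear in the exclude section). Alternative
-- decomposition, same cost.

-- ===== PORT A =====
def pvAlpha : String := "ARNDCEQGHILKMFPSTWYV"

-- list('ARNDCEQGHILKMFPSTWYV') as the 1-char strings Python's set holds
def pvAlphaList : List String := pvAlpha.toList.map (fun c => String.ofList [c])

-- the body of A's two identical `for s in …` loops (s is a 1-char string; `s in 'ARN…'`
-- for a 1-char string is substring membership, ported with PySem.Str.isIn)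
def pvStepA (s : PySem.Set String) (c : Char) : PySem.Set String :=
  if c == 'X' then PySem.Set.update s pvAlphaList
  else if PySem.Str.isIn (String.ofList [c]) pvAlpha then PySem.Set.add s (String.ofList [c])
  else s

def parse_sequon (sequon : String) : List String :=
  let parts := (PySem.Str.split? sequon "!").getD []   -- sep "!" ≠ "", so split? is some
  let residues_to_include := PySem.List.pyGetD parts 0 ""
  let residues_to_exclude := if 1 < parts.length then PySem.List.pyGetD parts 1 "" else ""
  let residues_pos := residues_to_include.toList.foldl pvStepA PySem.Set.empty
  let residues_neg := residues_to_exclude.toList.foldl pvStepA PySem.Set.empty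
  PySem.Set.diff residues_pos residues_neg

-- ===== PORT B =====
-- Source B's loop body: state = (bangs counter, the insertion-ordered dict `allowed`);
-- `allowed[r] = None` is Dict.insert, `allowed.clear()` is Dict.empty,
-- `allowed.pop(ch, None)` is Dict.erase (the value NoneType is modelled by Unit)
def pvStepB (st : Int × PySem.Dict String Unit) (ch : Char) : Int × PySem.Dict String Unit :=
  if ch == '!' then (st.1 + 1, st.2)
  else if st.1 == 0 then
    (st.1,
      if ch == 'X' then
        pvAlpha.toList.foldl (fun d r => d.insert (String.ofList [r]) ()) st.2
      else if PySem.Str.isIn (String.ofList [ch]) pvAlpha then st.2.insert (String.ofList [ch]) ()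
      else st.2)
  else if st.1 == 1 then
    (st.1,
      if ch == 'X' then PySem.Dict.empty
      else if PySem.Str.isIn (String.ofList [ch]) pvAlpha then st.2.erase (String.ofList [ch])
      else st.2)
  else st

def parse_sequon_alt (sequon : String) : List String :=
  PySem.Set.ofList ((sequon.toList.foldl pvStepB (0, PySem.Dict.empty)).2.keys)

-- ===== PRECONDITION & SPEC =====
def Spec_parse_sequon (sequon : String) (out : List String) : Prop := out = parse_sequon_alt sequon
instance (sequon : String) (out : List String) : Decidable (Spec_parse_sequon sequon out) := by unfold Spec_parse_sequon; infer_instance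

-- ===== CLAIM (what is proved, stated in full; the proofs are below) =====
def Claim_equal_parse_sequon : Prop := ∀ (sequon : String), Dom_parse_sequon sequon → Spec_parse_sequon sequon (parse_sequon sequon)

-- ===== LEMMAS AND PROOFS =====

-- splitting on '!', written as (first part, remaining parts)
def pvSplit : List Char → List Char × List (List Char)
  | [] => ([], [])
  | c :: cs =>
    let r := pvSplit cs
    if c = '!' then ([], r.1 :: r.2) else (c :: r.1, r.2)

-- the part A excludes on: the second piece of the split, if any
def pvNegPart (cs : List Char) : List Char :=
  match (pvSplit cs).2 with
  | [] => []
  | x :: _ => x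

lemma pvGo_eq (fuel : Nat) (l cur : List Char) (acc : List (List Char)) (h : l.length < fuel) :
    PySem.Chars.splitOn.go ['!'] fuel l cur acc =
      acc.reverse ++ (cur.reverse ++ (pvSplit l).1) :: (pvSplit l).2 := by
  induction fuel generalizing l cur acc with
  | zero => omega
  | succ fuel ih =>
    cases l with
    | nil => simp [PySem.Chars.splitOn.go, pvSplit]
    | cons c rest =>
      rw [PySem.Chars.splitOn.go]
      by_cases hc : c = '!'
      · subst hc
        rw [if_pos (by simp [List.isPrefixOf])]
        simp only [List.length_cons, List.length_nil, Nat.zero_add, List.drop_succ_cons,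
          List.drop_zero]
        rw [ih rest [] _ (by simpa using Nat.lt_of_succ_lt_succ h)]
        simp [pvSplit]
      · have hp : (['!'].isPrefixOf (c :: rest)) = false := by
          simp [List.isPrefixOf, Ne.symm hc]
        rw [if_neg (by simp [hp])]
        rw [ih rest (c :: cur) acc (by simpa using Nat.lt_of_succ_lt_succ h)]
        have hs : pvSplit (c :: rest) = (c :: (pvSplit rest).1, (pvSplit rest).2) := by
          rw [pvSplit]; simp [hc]
        rw [hs]
        simp

lemma pvSplitOn_bang (cs : List Char) :
    PySem.Chars.splitOn cs ['!'] = (pvSplit cs).1 :: (pvSplit cs).2 := by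
  have := pvGo_eq (cs.length + 1) cs [] [] (by omega)
  simpa [PySem.Chars.splitOn] using this

lemma pvContains_iff (s : List String) (x : String) :
    PySem.Set.contains s x = true ↔ x ∈ s := by
  simp [PySem.Set.contains]

lemma pvIsIn_single (c : Char) (s : String) :
    PySem.Str.isIn (String.ofList [c]) s = s.toList.contains c := by
  have : PySem.Str.isIn (String.ofList [c]) s = PySem.Chars.isIn [c] s.toList := by
    simp [PySem.Str.isIn_eq]
  rw [this, Bool.eq_iff_iff, PySem.Chars.isIn_iff_infix, List.singleton_infix_iff]
  simp

-- A's value, written through pvSplit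
lemma pvParseA_eq (s : String) :
    parse_sequon s =
      PySem.Set.diff ((pvSplit s.toList).1.foldl pvStepA PySem.Set.empty)
        ((pvNegPart s.toList).foldl pvStepA PySem.Set.empty) := by
  unfold parse_sequon
  have hsplit : PySem.Str.split? s "!" =
      some (String.ofList (pvSplit s.toList).1 :: ((pvSplit s.toList).2.map String.ofList)) := by
    simp [PySem.Str.split?, PySem.Chars.split?, pvSplitOn_bang]
  rw [hsplit]
  cases ht : (pvSplit s.toList).2 with
  | nil =>
    simp [pvNegPart, ht, PySem.List.pyGetD, String.toList_ofList]
  | cons x xs =>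
    simp [pvNegPart, ht, PySem.List.pyGetD, String.toList_ofList]

lemma pvMem_stepA (s : PySem.Set String) (c : Char) (y : String) :
    y ∈ pvStepA s c ↔ y ∈ s ∨ y ∈ pvStepA PySem.Set.empty c := by
  unfold pvStepA
  simp only [pvIsIn_single]
  by_cases hx : c = 'X'
  · simp [hx, PySem.Set.mem_update, PySem.Set.empty]
  · by_cases hin : c ∈ pvAlpha.toList
    · simp [hx, hin, PySem.Set.mem_add, PySem.Set.empty, or_comm]
    · simp [hx, hin, PySem.Set.empty]

lemma pvMem_foldA (l : List Char) (s : PySem.Set String) (y : String) :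
    y ∈ l.foldl pvStepA s ↔ y ∈ s ∨ y ∈ l.foldl pvStepA PySem.Set.empty := by
  induction l generalizing s with
  | nil => simp [PySem.Set.empty]
  | cons c l ih =>
    simp only [List.foldl_cons]
    rw [ih (pvStepA s c), ih (pvStepA PySem.Set.empty c), pvMem_stepA]
    tauto

lemma pvStepA_alpha (c : Char) (y : String) :
    y ∈ pvStepA PySem.Set.empty c → y ∈ pvAlphaList := by
  unfold pvStepA
  simp only [pvIsIn_single]
  by_cases hx : c = 'X'
  · intro hy
    have : y ∈ pvAlphaList := by
      simpa [hx, PySem.Set.mem_update, PySem.Set.empty] using hy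
    exact this
  · by_cases hin : c ∈ pvAlpha.toList
    · intro hy
      have hy' : y = String.ofList [c] := by
        simpa [hx, hin, PySem.Set.mem_add, PySem.Set.empty] using hy
      exact hy' ▸ List.mem_map.mpr ⟨c, hin, rfl⟩
    · simp [hx, hin, PySem.Set.empty]

lemma pvKeys_erase {ν : Type} (d : PySem.Dict String ν) (k : String) :
    (d.erase k).keys = d.keys.filter (fun x => !(x == k)) := by
  obtain ⟨l⟩ := d
  simp only [PySem.Dict.erase, PySem.Dict.keys]
  induction l with
  | nil => rfl
  | cons p l ih =>
    by_cases hp : (p.1 == k) = true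
    · simp [hp, ih]
    · simp only [List.filter_cons, hp, List.map_cons]
      simp [ih]

-- the dict after one include-section step / one exclude-section step of Source B
def pvDictStep0 (d : PySem.Dict String Unit) (c : Char) : PySem.Dict String Unit :=
  if c == 'X' then pvAlpha.toList.foldl (fun d r => d.insert (String.ofList [r]) ()) d
  else if PySem.Str.isIn (String.ofList [c]) pvAlpha then d.insert (String.ofList [c]) ()
  else d

def pvDictStep1 (d : PySem.Dict String Unit) (c : Char) : PySem.Dict String Unit :=
  if c == 'X' then PySem.Dict.empty
  else if PySem.Str.isIn (String.ofList [c]) pvAlpha then d.erase (String.ofList [c])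
  else d

lemma pvStep0_eq (d : PySem.Dict String Unit) (c : Char) (h : c ≠ '!') :
    pvStepB (0, d) c = (0, pvDictStep0 d c) := by
  have hb : (c == '!') = false := by simpa using h
  unfold pvStepB pvDictStep0
  rw [if_neg (by simp [hb]), if_pos (by rfl)]

lemma pvStep1_eq (d : PySem.Dict String Unit) (c : Char) (h : c ≠ '!') :
    pvStepB (1, d) c = (1, pvDictStep1 d c) := by
  have hb : (c == '!') = false := by simpa using h
  unfold pvStepB pvDictStep1
  rw [if_neg (by simp [hb]), if_neg (by simp), if_pos (by rfl)]

lemma pvStepBang (ph : Int) (d : PySem.Dict String Unit) :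
    pvStepB (ph, d) '!' = (ph + 1, d) := by
  unfold pvStepB
  rw [if_pos (by rfl)]

lemma pvKeys_step0 (d : PySem.Dict String Unit) (c : Char) :
    (pvDictStep0 d c).keys = pvStepA d.keys c := by
  unfold pvDictStep0 pvStepA
  by_cases hx : (c == 'X') = true
  · rw [if_pos hx, if_pos hx]
    rw [PySem.Dict.keys_foldl_insert_key pvAlpha.toList (fun r => String.ofList [r])
      (fun _ _ => ()) d]
    rfl
  · rw [if_neg hx, if_neg hx]
    by_cases hin : PySem.Str.isIn (String.ofList [c]) pvAlpha = true
    · rw [if_pos hin, if_pos hin]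
      by_cases hm : d.contains (String.ofList [c]) = true
      · rw [PySem.Dict.keys_insert_of_contains d () hm]
        unfold PySem.Set.add
        rw [if_pos ((pvContains_iff _ _).mpr ((PySem.Dict.contains_iff_mem_keys d _).mp hm))]
      · rw [PySem.Dict.keys_insert_of_not_contains d () (by simpa using hm)]
        unfold PySem.Set.add
        rw [if_neg (fun hcon =>
          hm ((PySem.Dict.contains_iff_mem_keys d _).mpr ((pvContains_iff _ _).mp hcon)))]
    · rw [if_neg hin, if_neg hin]

lemma pvFold2 (l : List Char) (ph : Int) (d : PySem.Dict String Unit) (h : 2 ≤ ph) :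
    (l.foldl pvStepB (ph, d)).2 = d := by
  induction l generalizing ph with
  | nil => rfl
  | cons c l ih =>
    simp only [List.foldl_cons]
    by_cases hc : c = '!'
    · rw [hc, pvStepBang]
      exact ih (ph + 1) (by omega)
    · rw [show pvStepB (ph, d) c = (ph, d) by
        unfold pvStepB
        rw [if_neg (by simpa using hc), if_neg (by simp; omega), if_neg (by simp; omega)]]
      exact ih ph h
lemma pvDiff_nil (s : PySem.Set String) : PySem.Set.diff s ([] : List String) = s := by
  simp [PySem.Set.diff, PySem.Set.contains]

lemma pvDiff_all {s t : PySem.Set String} (h : ∀ x ∈ s, x ∈ t) :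
    PySem.Set.diff s t = [] := by
  simp only [PySem.Set.diff, List.filter_eq_nil_iff]
  intro x hx
  simp [PySem.Set.contains, h x hx]

lemma pvStepA_empty_mem (c : Char) (hx : ¬ (c == 'X') = true)
    (hin : PySem.Str.isIn (String.ofList [c]) pvAlpha = true) :
    pvStepA PySem.Set.empty c = [String.ofList [c]] := by
  unfold pvStepA
  rw [if_neg hx, if_pos hin]
  rfl

lemma pvStepA_empty_none (c : Char) (hx : ¬ (c == 'X') = true)
    (hin : ¬ PySem.Str.isIn (String.ofList [c]) pvAlpha = true) :
    pvStepA PySem.Set.empty c = PySem.Set.empty := by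
  unfold pvStepA
  rw [if_neg hx, if_neg hin]

lemma pvSplit_cons_ne (c : Char) (l : List Char) (hc : c ≠ '!') :
    pvSplit (c :: l) = (c :: (pvSplit l).1, (pvSplit l).2) := by
  rw [pvSplit]; simp [hc]

lemma pvSplit_cons_bang (l : List Char) :
    pvSplit ('!' :: l) = ([], (pvSplit l).1 :: (pvSplit l).2) := by
  rw [pvSplit]; simp

lemma pvKeys_empty : (PySem.Dict.empty : PySem.Dict String Unit).keys = ([] : List String) := by
  simp [PySem.Dict.keys, PySem.Dict.empty]

lemma pvMain1 (l : List Char) (d : PySem.Dict String Unit)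
    (hsub : ∀ x ∈ d.keys, x ∈ pvAlphaList) :
    (l.foldl pvStepB (1, d)).2.keys =
      PySem.Set.diff d.keys ((pvSplit l).1.foldl pvStepA PySem.Set.empty) := by
  induction l generalizing d with
  | nil => exact (pvDiff_nil d.keys).symm
  | cons c l ih =>
    simp only [List.foldl_cons]
    by_cases hc : c = '!'
    · subst hc
      rw [pvStepBang, pvFold2 l (1 + 1) d (by omega), pvSplit_cons_bang]
      exact (pvDiff_nil d.keys).symm
    · rw [pvStep1_eq d c hc, pvSplit_cons_ne c l hc]
      simp only [List.foldl_cons]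
      unfold pvDictStep1
      by_cases hx : (c == 'X') = true
      · rw [if_pos hx]
        rw [ih PySem.Dict.empty (by rw [pvKeys_empty]; intro x hx; cases hx), pvKeys_empty]
        have hXA : pvStepA PySem.Set.empty c = PySem.Set.update PySem.Set.empty pvAlphaList := by
          unfold pvStepA; rw [if_pos hx]
        rw [hXA]
        have h2 : PySem.Set.diff d.keys
            ((pvSplit l).1.foldl pvStepA (PySem.Set.update PySem.Set.empty pvAlphaList)) = [] := by
          apply pvDiff_all
          intro x hxm
          exact (pvMem_foldA (pvSplit l).1 _ x).mpr
            (Or.inl ((PySem.Set.mem_update _ _ _).mpr (Or.inr (hsub x hxm))))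
        rw [h2]
        rfl
      · by_cases hin : PySem.Str.isIn (String.ofList [c]) pvAlpha = true
        · rw [if_neg hx, if_pos hin]
          rw [ih (d.erase (String.ofList [c]))
            (by rw [pvKeys_erase]; intro x hxm; exact hsub x (List.mem_of_mem_filter hxm))]
          rw [pvKeys_erase, pvStepA_empty_mem c hx hin]
          show (List.filter _ _).filter _ = PySem.Set.diff d.keys _
          rw [List.filter_filter]
          apply List.filter_congr
          intro x hxm
          have hmem : x ∈ (pvSplit l).1.foldl pvStepA [String.ofList [c]] ↔
              x = String.ofList [c] ∨ x ∈ (pvSplit l).1.foldl pvStepA PySem.Set.empty := by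
            rw [pvMem_foldA (pvSplit l).1 [String.ofList [c]] x]
            simp
          have hself : String.ofList [c] ∈ (pvSplit l).1.foldl pvStepA [String.ofList [c]] :=
            (pvMem_foldA _ _ _).mpr (Or.inl (by simp))
          by_cases h1 : x = String.ofList [c]
          · simp [PySem.Set.contains, h1, hself]
          · by_cases h2 : x ∈ (pvSplit l).1.foldl pvStepA PySem.Set.empty
            · simp [PySem.Set.contains, h1, hmem]
            · simp [PySem.Set.contains, h1, hmem]
        · rw [if_neg hx, if_neg hin, pvStepA_empty_none c hx hin]
          exact ih d hsub

lemma pvMain0 (l : List Char) (d : PySem.Dict String Unit)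
    (hsub : ∀ x ∈ d.keys, x ∈ pvAlphaList) :
    (l.foldl pvStepB (0, d)).2.keys =
      PySem.Set.diff ((pvSplit l).1.foldl pvStepA d.keys)
        ((pvNegPart l).foldl pvStepA PySem.Set.empty) := by
  induction l generalizing d with
  | nil => exact (pvDiff_nil d.keys).symm
  | cons c l ih =>
    simp only [List.foldl_cons]
    by_cases hc : c = '!'
    · subst hc
      rw [pvStepBang, pvSplit_cons_bang]
      show (l.foldl pvStepB (1, d)).2.keys = _
      rw [pvMain1 l d hsub]
      rfl
    · rw [pvStep0_eq d c hc, pvSplit_cons_ne c l hc]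
      simp only [List.foldl_cons]
      rw [ih (pvDictStep0 d c) ?_]
      · rw [pvKeys_step0]
        have hneg : pvNegPart (c :: l) = pvNegPart l := by
          unfold pvNegPart
          rw [pvSplit_cons_ne c l hc]
        rw [hneg]
      · intro x hxm
        rw [pvKeys_step0] at hxm
        rcases (pvMem_stepA d.keys c x).mp hxm with h | h
        · exact hsub x h
        · exact pvStepA_alpha c x h

lemma pvFoldlAdd (l : List String) (s : PySem.Set String) (hl : l.Nodup)
    (hd : ∀ x ∈ l, x ∉ s) : l.foldl PySem.Set.add s = s ++ l := by
  induction l generalizing s with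
  | nil => simp
  | cons a l ih =>
    simp only [List.foldl_cons]
    have ha : PySem.Set.add s a = s ++ [a] := by
      unfold PySem.Set.add
      rw [if_neg (fun hcon => hd a (by simp) ((pvContains_iff _ _).mp hcon))]
    rw [ha, ih (s ++ [a]) (List.Nodup.of_cons hl) ?_]
    · simp
    · intro x hx hmem
      rcases List.mem_append.mp hmem with h | h
      · exact hd x (by simp [hx]) h
      · rcases List.mem_singleton.mp h with rfl
        exact (List.nodup_cons.mp hl).1 hx

lemma pvOfList_nodup (l : List String) (h : l.Nodup) : PySem.Set.ofList l = l := by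
  have : PySem.Set.ofList l = l.foldl PySem.Set.add ([] : List String) := rfl
  rw [this, pvFoldlAdd l [] h (by simp)]
  simp

lemma pvNodup_foldA (l : List Char) (s : PySem.Set String) (h : s.Nodup) :
    (l.foldl pvStepA s).Nodup := by
  induction l generalizing s with
  | nil => exact h
  | cons c l ih =>
    simp only [List.foldl_cons]
    apply ih
    unfold pvStepA
    by_cases hx : (c == 'X') = true
    · rw [if_pos hx]; exact PySem.Set.nodup_update s pvAlphaList h
    · rw [if_neg hx]
      by_cases hin : PySem.Str.isIn (String.ofList [c]) pvAlpha = true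
      · rw [if_pos hin]; exact PySem.Set.nodup_add s _ h
      · rw [if_neg hin]; exact h

-- ===== VERDICT (by name: the statement is the Claim_ definition above) =====
theorem parse_sequon_spec : Claim_equal_parse_sequon := by
  intro sequon _
  unfold Spec_parse_sequon
  rw [pvParseA_eq]
  unfold parse_sequon_alt
  rw [pvMain0 _ _ (by simp [PySem.Dict.keys, PySem.Dict.empty])]
  have hk : (PySem.Dict.empty : PySem.Dict String Unit).keys = ([] : List String) := by
    simp [PySem.Dict.keys, PySem.Dict.empty]
  rw [hk]
  exact (pvOfList_nodup _ ((pvNodup_foldA _ _ List.nodup_nil).filter _)).symm
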